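-- pv_equiv track=rewrite | github.com/ClaudioCarvalhoo/you-can-accomplish-anything-with-just-enough-determination-and-a-little-bit-of-luck | problems/LC301.py | findNecessaryRemovals
-- ===== SOURCE A (Python) =====
-- def findNecessaryRemovals(s):
--     res = 0
--     opened = 0
--     closed = 0
--     for char in s:
--         if char == "(":
--             opened += 1
--         elif char == ")":
--             if opened > closed:
--                 closed += 1
--             else:
--                 res += 1
--     res += opened - closed
--     return res
-- ===== SOURCE B (Python) =====
-- def findNecessaryRemovals(s):
--     close_removals = 0
--     balance = 0
--     for ch in s:
--         if ch == ")":
--             if balance == 0: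
--                 close_removals += 1
--             else:
--                 balance -= 1
--         elif ch == "(":
--             balance += 1
--     open_removals = 0
--     balance = 0
--     for ch in reversed(s):
--         if ch == "(":
--             if balance == 0:
--                 open_removals += 1
--             else:
--                 balance -= 1
--         elif ch == ")":
--             balance += 1
--     return close_removals + open_removals
-- ===== Notes on version B (the rewrite author's own statement) =====
-- stated objective: alternative
-- what changed: Replaces A's single fused pass carrying (res, opened, closed) by two independent opposite-direction scans: a left-to-right pass counting unmatched ')' and a right-to-left pass counting unmatched '(', summing the two counts.
import Mathlib
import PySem

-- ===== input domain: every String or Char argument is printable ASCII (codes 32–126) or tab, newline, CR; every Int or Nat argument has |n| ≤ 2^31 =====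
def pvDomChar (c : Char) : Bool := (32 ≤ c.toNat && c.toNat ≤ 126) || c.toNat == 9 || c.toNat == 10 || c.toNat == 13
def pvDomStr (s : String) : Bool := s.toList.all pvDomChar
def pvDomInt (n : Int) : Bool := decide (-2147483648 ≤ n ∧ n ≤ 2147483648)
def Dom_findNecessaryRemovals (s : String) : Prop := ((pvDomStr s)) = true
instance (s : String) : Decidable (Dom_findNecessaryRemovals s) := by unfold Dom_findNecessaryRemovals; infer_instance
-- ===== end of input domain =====

-- ===== PORT A =====
def stepA (st : Int × Int × Int) (c : Char) : Int × Int × Int :=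
  if c = '(' then (st.1, st.2.1 + 1, st.2.2)
  else if c = ')' then
    (if st.2.1 > st.2.2 then (st.1, st.2.1, st.2.2 + 1) else (st.1 + 1, st.2.1, st.2.2))
  else st

def findNecessaryRemovals (s : String) : Int :=
  let st := s.toList.foldl stepA (0, 0, 0)
  st.1 + (st.2.1 - st.2.2)

-- ===== PORT B =====
-- forward pass step: count ')' seen with zero balance, else absorb it into the balance
def stepFwd (st : Int × Int) (c : Char) : Int × Int :=
  if c = ')' then (if st.2 = 0 then (st.1 + 1, st.2) else (st.1, st.2 - 1))
  else if c = '(' then (st.1, st.2 + 1)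
  else st

-- backward pass step (run over the reversed string): the mirror image for '('
def stepBwd (st : Int × Int) (c : Char) : Int × Int :=
  if c = '(' then (if st.2 = 0 then (st.1 + 1, st.2) else (st.1, st.2 - 1))
  else if c = ')' then (st.1, st.2 + 1)
  else st

def findNecessaryRemovals_alt (s : String) : Int :=
  let p1 := s.toList.foldl stepFwd (0, 0)
  let p2 := s.toList.reverse.foldl stepBwd (0, 0)
  p1.1 + p2.1

-- ===== PRECONDITION & SPEC =====
def Spec_findNecessaryRemovals (s : String) (out : Int) : Prop := out = findNecessaryRemovals_alt s
instance (s : String) (out : Int) : Decidable (Spec_findNecessaryRemovals s out) := by unfold Spec_findNecessaryRemovals; infer_instance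

-- ===== CLAIM (what is proved, stated in full; the proofs are below) =====
def Claim_equal_findNecessaryRemovals : Prop := ∀ (s : String), Dom_findNecessaryRemovals s → Spec_findNecessaryRemovals s (findNecessaryRemovals s)

-- ===== LEMMAS AND PROOFS =====

-- the backward-pass result (open removals, close balance) of a list
def grB (l : List Char) : Int × Int := l.reverse.foldl stepBwd (0, 0)

theorem grB_cons (c : Char) (l : List Char) : grB (c :: l) = stepBwd (grB l) c := by
  simp [grB, List.foldl_append]

-- A's fused fold agrees with B's forward pass under the map (res, opened, closed) ↦ (res, opened - closed)
theorem foldA_eq_fwd (l : List Char) : ∀ (r o c : Int), c ≤ o →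
    (l.foldl stepA (r, o, c)).1 = (l.foldl stepFwd (r, o - c)).1 ∧
    (l.foldl stepA (r, o, c)).2.1 - (l.foldl stepA (r, o, c)).2.2 = (l.foldl stepFwd (r, o - c)).2 := by
  induction l with
  | nil => intro r o c h; simp
  | cons ch l ih =>
    intro r o c h
    simp only [List.foldl_cons, stepA, stepFwd]
    by_cases h1 : ch = '('
    · simpa [h1, show o + 1 - c = o - c + 1 by ring] using ih r (o + 1) c (by omega)
    · by_cases h2 : ch = ')'
      · by_cases h3 : o > c
        · have := ih r o (c + 1) (by omega)
          simp only [h2] at *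
          simpa [h3, show ¬ (o - c = 0) by omega, show o - (c + 1) = o - c - 1 by ring] using this
        · have := ih (r + 1) o c h
          simp only [h2] at *
          simpa [h3, show o - c = 0 by omega] using this
      · simpa [h1, h2] using ih r o c h

-- both components of the backward-pass state are nonnegative
theorem grB_nonneg (l : List Char) : 0 ≤ (grB l).1 ∧ 0 ≤ (grB l).2 := by
  induction l with
  | nil => simp [grB]
  | cons c l ih =>
    rw [grB_cons]
    unfold stepBwd
    split_ifs <;> simp_all <;> omega

-- forward final balance from a start balance b, against the backward-pass summary
theorem fwd_balance (l : List Char) : ∀ (r b : Int), 0 ≤ b →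
    (l.foldl stepFwd (r, b)).2 = b - min b (grB l).2 + (grB l).1 := by
  induction l with
  | nil => intro r b h; simp [grB]; omega
  | cons c l ih =>
    intro r b h
    have hg := grB_nonneg l
    rw [List.foldl_cons, grB_cons]
    by_cases h2 : c = ')'
    · by_cases h3 : b = 0
      · rw [show stepFwd (r, b) c = (r + 1, b) by simp [stepFwd, h2, h3],
            show stepBwd (grB l) c = ((grB l).1, (grB l).2 + 1) by simp [stepBwd, h2]]
        rw [ih (r + 1) b h]; omega
      · rw [show stepFwd (r, b) c = (r, b - 1) by simp [stepFwd, h2, h3],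
            show stepBwd (grB l) c = ((grB l).1, (grB l).2 + 1) by simp [stepBwd, h2]]
        rw [ih r (b - 1) (by omega)]; omega
    · by_cases h1 : c = '('
      · by_cases h4 : (grB l).2 = 0
        · rw [show stepFwd (r, b) c = (r, b + 1) by simp [stepFwd, h1],
              show stepBwd (grB l) c = ((grB l).1 + 1, (grB l).2) by simp [stepBwd, h1, h4]]
          rw [ih r (b + 1) (by omega)]; omega
        · rw [show stepFwd (r, b) c = (r, b + 1) by simp [stepFwd, h1],
              show stepBwd (grB l) c = ((grB l).1, (grB l).2 - 1) by simp [stepBwd, h1, h4]]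
          rw [ih r (b + 1) (by omega)]; omega
      · rw [show stepFwd (r, b) c = (r, b) by simp [stepFwd, h1, h2],
            show stepBwd (grB l) c = grB l by simp [stepBwd, h1, h2]]
        exact ih r b h

-- ===== VERDICT (by name: the statement is the Claim_ definition above) =====
theorem findNecessaryRemovals_spec : Claim_equal_findNecessaryRemovals := by
  intro s _
  unfold Spec_findNecessaryRemovals
  have hA := foldA_eq_fwd s.toList 0 0 0 le_rfl
  norm_num at hA
  have hb := fwd_balance s.toList 0 0 le_rfl
  have hg := grB_nonneg s.toList
  simp only [findNecessaryRemovals, findNecessaryRemovals_alt]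
  rw [hA.1, hA.2, hb, show s.toList.reverse.foldl stepBwd (0, 0) = grB s.toList from rfl]
  omega
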